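-- pv_equiv track=rewrite | github.com/nehalkarrar/codeSignal | lexicographically smaller.py | solution
-- ===== SOURCE A (Python) =====
-- def solution(s, t):
--     num1 = ''.join(filter(str.isdigit, s))
--     num1_lst = list(num1)
--
--     num2 = ''.join(filter(str.isdigit, t))
--     num2_lst = list(num2)
--
--     count = 0
--
--     for i in range(len(s)):
--         if s[i] in num1_lst:
--             new_s = s.replace(s[i], '')
--             if new_s < t:
--                 count += 1
--
--     for i in range(len(t)):
--         if t[i] in num2_lst:
--             new_t = t.replace(t[i], '')
--             if s < new_t:
--                 count += 1
--
--     return count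
-- ===== SOURCE B (Python) =====
-- def solution(s, t):
--     count = 0
--     for d in dict.fromkeys(filter(str.isdigit, s)):
--         if s.replace(d, '') < t:
--             count += s.count(d)
--     for d in dict.fromkeys(filter(str.isdigit, t)):
--         if s < t.replace(d, ''):
--             count += t.count(d)
--     return count
-- ===== Notes on version B (the rewrite author's own statement) =====
-- stated objective: faster
-- what changed: B iterates over the at most 10 distinct digits of each string (dict.fromkeys of the digit filter), does each replace-and-compare once and adds that digit's multiplicity, instead of A's replace-and-compare at every digit position.
import Mathlib
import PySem

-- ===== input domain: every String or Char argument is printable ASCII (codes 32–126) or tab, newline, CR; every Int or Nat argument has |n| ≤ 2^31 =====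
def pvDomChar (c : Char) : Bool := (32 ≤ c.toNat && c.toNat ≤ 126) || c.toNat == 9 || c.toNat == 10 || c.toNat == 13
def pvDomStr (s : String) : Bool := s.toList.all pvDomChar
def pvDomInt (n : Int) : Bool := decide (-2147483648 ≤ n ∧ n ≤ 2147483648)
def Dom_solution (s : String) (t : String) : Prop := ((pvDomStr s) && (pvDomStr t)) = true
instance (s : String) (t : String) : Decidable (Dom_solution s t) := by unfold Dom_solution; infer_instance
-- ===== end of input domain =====

-- B groups the per-position scan by distinct digit (≤ 10 of them), doing each replace/compare once and adding the digit's
-- multiplicity, instead of A's replace+compare at every digit position: same return value, O(n^2) → O(n).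

-- ===== PORT A =====
def solution (s : String) (t : String) : Int :=
  let sl := s.toList
  let tl := t.toList
  -- num1 = ''.join(filter(str.isdigit, s)); num1_lst = list(num1)
  let num1_lst := sl.filter PySem.Str.isdigit
  -- num2 = ''.join(filter(str.isdigit, t)); num2_lst = list(num2)
  let num2_lst := tl.filter PySem.Str.isdigit
  -- for i in range(len(s)): reads exactly s[0], …, s[len(s)-1] in order
  let count : Int := sl.foldl (fun acc c =>
      if c ∈ num1_lst then
        (if PySem.Chars.strLt (PySem.Chars.replace sl [c] []) tl then acc + 1 else acc)
      else acc) 0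
  tl.foldl (fun acc c =>
      if c ∈ num2_lst then
        (if PySem.Chars.strLt sl (PySem.Chars.replace tl [c] []) then acc + 1 else acc)
      else acc) count

-- ===== PORT B =====
def solution_alt (s : String) (t : String) : Int :=
  let sl := s.toList
  let tl := t.toList
  -- for d in dict.fromkeys(filter(str.isdigit, s)): distinct digits of s, first-occurrence order
  let count : Int := (PySem.List.dedup (sl.filter PySem.Str.isdigit)).foldl (fun acc d =>
      if PySem.Chars.strLt (PySem.Chars.replace sl [d] []) tl then
        acc + (PySem.Chars.count sl [d] : Int)
      else acc) 0
  (PySem.List.dedup (tl.filter PySem.Str.isdigit)).foldl (fun acc d =>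
      if PySem.Chars.strLt sl (PySem.Chars.replace tl [d] []) then
        acc + (PySem.Chars.count tl [d] : Int)
      else acc) count

-- ===== PRECONDITION & SPEC =====
def Spec_solution (s : String) (t : String) (out : Int) : Prop := out = solution_alt s t
instance (s : String) (t : String) (out : Int) : Decidable (Spec_solution s t out) := by unfold Spec_solution; infer_instance

-- ===== CLAIM (what is proved, stated in full; the proofs are below) =====
def Claim_equal_solution : Prop := ∀ (s : String) (t : String), Dom_solution s t → Spec_solution s t (solution s t)

-- ===== LEMMAS AND PROOFS =====

-- PySem.Chars.count with a single-character needle is plain element count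
theorem pvGoSingle (d : Char) : ∀ (l : List Char) (fuel acc : Nat), l.length ≤ fuel →
    PySem.Chars.count.go [d] fuel l acc = acc + l.count d := by
  intro l
  induction l with
  | nil => intro fuel acc h; cases fuel <;> simp [PySem.Chars.count.go]
  | cons c t ih =>
    intro fuel acc h
    cases fuel with
    | zero => simp at h
    | succ n =>
      simp only [PySem.Chars.count.go, List.isPrefixOf, List.count_cons]
      by_cases hdc : d = c
      · subst hdc
        simp [ih n (acc + 1) (by simpa using h)]
        omega
      · simp [hdc, Ne.symm hdc, ih n acc (by simpa using h)]

theorem pvCountSingle (l : List Char) (d : Char) : PySem.Chars.count l [d] = l.count d := by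
  simp [PySem.Chars.count, pvGoSingle d l l.length 0 le_rfl]

-- over a Nodup list, the 0/1-sum selecting d = c collapses to a single indicator
theorem pvSumSingle (q : Char → Bool) (c : Char) :
    ∀ (ds : List Char), ds.Nodup →
    (ds.map (fun d => if q d = true ∧ d = c then (1 : Int) else 0)).sum
      = if c ∈ ds ∧ q c = true then 1 else 0 := by
  intro ds
  induction ds with
  | nil => simp
  | cons d rest ih =>
    intro hnd
    rcases List.nodup_cons.mp hnd with ⟨hdn, hrest⟩
    simp only [List.map_cons, List.sum_cons, List.mem_cons, ih hrest]
    by_cases hdc : d = c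
    · subst hdc
      by_cases hq : q d = true <;> simp [hq, hdn]
    · by_cases hcr : c ∈ rest <;> by_cases hq : q c = true <;>
        simp [hdc, Ne.symm hdc, hcr, hq]

-- grouping: per-element 0/1-sum over l  =  per-distinct-value count-weighted sum over ds
theorem pvGroup (ds m : List Char) (q : Char → Bool) (hnd : ds.Nodup)
    (hm : ∀ c, c ∈ m ↔ c ∈ ds) :
    ∀ l : List Char,
    (l.map (fun c => if c ∈ m ∧ q c = true then (1 : Int) else 0)).sum
      = (ds.map (fun d => if q d = true then (l.count d : Int) else 0)).sum := by
  intro l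
  induction l with
  | nil => simp
  | cons c r ih =>
    simp only [List.map_cons, List.sum_cons, List.count_cons]
    have hsplit : ∀ d : Char,
        (if q d = true then (((r.count d + if c == d then 1 else 0 : Nat)) : Int) else 0)
          = (if q d = true then (r.count d : Int) else 0)
            + (if q d = true ∧ d = c then 1 else 0) := by
      intro d
      by_cases hq : q d = true <;> by_cases hdc : d = c
      · subst hdc; simp [hq]
      · simp [hq, hdc, Ne.symm hdc]
      · simp [hq]
      · simp [hq]
    simp only [hsplit, PySem.List.sum_map_add_int, pvSumSingle q c ds hnd, ih]
    by_cases hcm : c ∈ m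
    · have hcd : c ∈ ds := (hm c).mp hcm
      by_cases hq : q c = true <;> simp [hcm, hcd, hq]; ring
    · have hcd : c ∉ ds := fun h => hcm ((hm c).mpr h)
      simp [hcm, hcd]

-- A's loop body, reshaped to an additive fold, is a 0/1-sum
theorem pvFoldA (l : List Char) (m : List Char) (q : Char → Bool) (a : Int) :
    l.foldl (fun acc c =>
        if c ∈ m then (if q c = true then acc + 1 else acc) else acc) a
      = a + (l.map (fun c => if c ∈ m ∧ q c = true then (1 : Int) else 0)).sum := by
  rw [PySem.List.foldl_congr_mem l _ (fun acc c => acc + if c ∈ m ∧ q c = true then (1 : Int) else 0) a ?_,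
      PySem.List.foldl_add]
  intro acc x _
  by_cases h1 : x ∈ m <;> by_cases h2 : q x = true <;> simp [h1, h2]

-- B's loop body, reshaped to an additive fold, is a count-weighted sum
theorem pvFoldB (l : List Char) (q : Char → Bool) (g : Char → Int) (a : Int) :
    l.foldl (fun acc d => if q d = true then acc + g d else acc) a
      = a + (l.map (fun d => if q d = true then g d else 0)).sum := by
  rw [PySem.List.foldl_congr_mem l _ (fun acc d => acc + if q d = true then g d else 0) a ?_,
      PySem.List.foldl_add]
  intro acc x _
  by_cases h : q x = true <;> simp [h]

theorem pvMain (s t : String) : solution s t = solution_alt s t := by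
  unfold solution solution_alt
  simp only []
  rw [pvFoldA, pvFoldA, pvFoldB, pvFoldB]
  have h1 := pvGroup (PySem.List.dedup (s.toList.filter PySem.Str.isdigit))
      (s.toList.filter PySem.Str.isdigit)
      (fun c => PySem.Chars.strLt (PySem.Chars.replace s.toList [c] []) t.toList)
      (PySem.List.nodup_dedup _) (fun c => (PySem.List.mem_dedup _ _).symm) s.toList
  have h2 := pvGroup (PySem.List.dedup (t.toList.filter PySem.Str.isdigit))
      (t.toList.filter PySem.Str.isdigit)
      (fun c => PySem.Chars.strLt s.toList (PySem.Chars.replace t.toList [c] []))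
      (PySem.List.nodup_dedup _) (fun c => (PySem.List.mem_dedup _ _).symm) t.toList
  simp only [pvCountSingle]
  rw [h1, h2]

-- ===== VERDICT (by name: the statement is the Claim_ definition above) =====
theorem solution_spec : Claim_equal_solution := by
  intro s t _
  unfold Spec_solution
  exact pvMain s t
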